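-- pv_equiv track=rewrite | github.com/chloeeekim/TIL | Algorithm/Programmers/Python/250136.py | solution
-- ===== SOURCE A (Python) =====
-- def solution(land):
--     n, m = len(land), len(land[0])
--     total = [0] * m
--
--     def bfs(i, j):
--         queue = []
--         queue.append([i, j])
--         land[i][j] = -1
--         size = 1
--         min_j = max_j = j
--
--         while queue:
--             x, y = queue.pop(0)
--             for dx, dy in [(-1, 0), (1, 0), (0, -1), (0, 1)]:
--                 nx, ny = x + dx, y + dy
--                 if 0 <= nx < n and 0 <= ny < m and land[nx][ny] == 1:
--                     land[nx][ny] = -1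
--                     queue.append([nx, ny])
--                     size += 1
--                     min_j = min(min_j, ny)
--                     max_j = max(max_j, ny)
--         return size, min_j, max_j
--
--     for i in range(n):
--         for j in range(m):
--             if land[i][j] == 1:
--                 size, min_j, max_j = bfs(i, j)
--                 for k in range(min_j, max_j + 1):
--                     total[k] += size
--
--     return max(total)
-- ===== SOURCE B (Python) =====
-- def solution(land):
--     # Level-order flood fill (two-list frontier, no O(n) pop(0)) + difference-array
--     # aggregation with a single prefix-sum/max scan instead of per-component range adds.
--     # Note: like A, this mutates land in place (visited cells become -1).
--     n, m = len(land), len(land[0])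
--     diff = [0] * (m + 1)
--     for i in range(n):
--         for j in range(m):
--             if land[i][j] == 1:
--                 land[i][j] = -1
--                 frontier = [(i, j)]
--                 size, mn, mx = 1, j, j
--                 while frontier:
--                     nxt = []
--                     for x, y in frontier:
--                         for nx, ny in ((x - 1, y), (x + 1, y), (x, y - 1), (x, y + 1)):
--                             if 0 <= nx < n and 0 <= ny < m and land[nx][ny] == 1:
--                                 land[nx][ny] = -1
--                                 nxt.append((nx, ny))
--                                 size += 1
--                                 mn = min(mn, ny)
--                                 mx = max(mx, ny)
--                     frontier = nxt
--                 diff[mn] += size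
--                 diff[mx + 1] -= size
--     best = None
--     run = 0
--     for k in range(m):
--         run += diff[k]
--         if best is None or run > best:
--             best = run
--     return best
-- ===== Notes on version B (the rewrite author's own statement) =====
-- stated objective: alternative
-- what changed: B discovers each island with a two-list level-order flood fill instead of A's FIFO queue with list.pop(0), and replaces A's per-component loop adding its size to every covered column of `total` by two point-updates of a difference array that is read off in a single final prefix-sum/running-max scan.
import Mathlib
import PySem

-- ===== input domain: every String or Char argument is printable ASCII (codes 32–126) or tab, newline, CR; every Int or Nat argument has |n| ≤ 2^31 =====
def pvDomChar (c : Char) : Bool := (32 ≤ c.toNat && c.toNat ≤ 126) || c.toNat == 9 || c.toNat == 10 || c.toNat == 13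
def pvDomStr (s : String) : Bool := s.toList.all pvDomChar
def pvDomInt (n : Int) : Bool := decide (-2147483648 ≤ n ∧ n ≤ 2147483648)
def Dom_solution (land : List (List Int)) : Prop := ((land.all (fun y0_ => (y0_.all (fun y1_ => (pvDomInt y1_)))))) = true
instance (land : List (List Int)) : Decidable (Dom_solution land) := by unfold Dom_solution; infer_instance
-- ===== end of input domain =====

-- B replaces A's FIFO queue (list.pop(0)) by a two-list level-order flood fill and the
-- per-component column-range additions by a difference array read off in one prefix-sum/max
-- scan; like A, the Python B mutates `land` in place (visited cells become -1), and the
-- equivalence proved here is about the return value.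

-- ===== PORT A =====
-- land[x][y] / land[x][y] = v; used only at indices that are in range under Pre_ (getD is exact there)
def pvGetCell (L : List (List Int)) (x y : Int) : Int := (L.getD x.toNat []).getD y.toNat 0
def pvSetCell (L : List (List Int)) (x y : Int) (v : Int) : List (List Int) :=
  L.modify x.toNat (fun row => row.set y.toNat v)

-- number of 1-cells; termination measure for both flood-fill loops (cited by decreasing_by)
def pvOnes (L : List (List Int)) : Nat := (L.map (fun r => r.count 1)).sum


-- termination helpers for the two flood-fill loops (cited by decreasing_by below)
theorem count_set_lt (l : List Int) (j : Nat) (hj : j < l.length) (h1 : l[j] = 1) :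
    (l.set j (-1)).count 1 < l.count 1 := by
  have hs : l.set j (-1) = l.take j ++ (-1) :: l.drop (j+1) := by
    rw [List.set_eq_take_append_cons_drop]; simp [hj]
  have hl : l = l.take j ++ l[j] :: l.drop (j+1) := by
    conv_lhs => rw [← List.take_append_drop j l, List.drop_eq_getElem_cons hj]
  rw [hs]; conv_rhs => rw [hl]
  simp [List.count_append, h1]

theorem pvOnes_setCell_lt (L : List (List Int)) (x y : Int) (h : pvGetCell L x y = 1) :
    pvOnes (pvSetCell L x y (-1)) < pvOnes L := by
  unfold pvGetCell at h
  have hi : x.toNat < L.length := by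
    by_contra hc
    rw [show L.getD x.toNat [] = [] from by
      rw [List.getD_eq_getElem?_getD, List.getElem?_eq_none (by omega)]; rfl] at h
    simp [List.getD] at h
  have hrow : L.getD x.toNat [] = L[x.toNat] := List.getD_eq_getElem L [] hi
  rw [hrow] at h
  have hj : y.toNat < L[x.toNat].length := by
    by_contra hc
    rw [List.getD_eq_getElem?_getD, List.getElem?_eq_none (by omega)] at h
    simp at h
  have h1 : L[x.toNat][y.toNat] = 1 := by
    rw [List.getD_eq_getElem?_getD, List.getElem?_eq_getElem hj] at h
    simpa using h
  unfold pvSetCell pvOnes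
  rw [List.modify_eq_take_cons_drop hi]
  conv_rhs => rw [show L = L.take x.toNat ++ L[x.toNat] :: L.drop (x.toNat+1) from by
    conv_lhs => rw [← List.take_append_drop x.toNat L, List.drop_eq_getElem_cons hi]]
  simp only [List.map_append, List.map_cons, List.sum_append, List.sum_cons]
  have := count_set_lt L[x.toNat] y.toNat hj h1
  omega

theorem foldl_mono_measure {α σ : Type} (μ : σ → Nat) (f : σ → α → σ)
    (hstep : ∀ s a, μ (f s a) ≤ μ s) : ∀ (l : List α) (s : σ), μ (l.foldl f s) ≤ μ s := by
  intro l
  induction l with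
  | nil => intro s; simp
  | cons c cs ih => intro s; exact le_trans (ih (f s c)) (hstep s c)

def pvNbrs : List (Int × Int) := [(-1, 0), (1, 0), (0, -1), (0, 1)]

-- body of A's `if 0 <= nx < n and 0 <= ny < m and land[nx][ny] == 1:` on state (land, queue, size, min_j, max_j)
def bfsTry (n m : Int) (st : List (List Int) × List (Int × Int) × Int × Int × Int)
    (p : Int × Int) : List (List Int) × List (Int × Int) × Int × Int × Int :=
  if 0 ≤ p.1 ∧ p.1 < n ∧ 0 ≤ p.2 ∧ p.2 < m ∧ pvGetCell st.1 p.1 p.2 = 1 then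
    (pvSetCell st.1 p.1 p.2 (-1), st.2.1 ++ [p], st.2.2.1 + 1,
      min st.2.2.2.1 p.2, max st.2.2.2.2 p.2)
  else st

-- `for dx, dy in [...]` for the popped cell (x, y)
def bfsPop (n m x y : Int) (st : List (List Int) × List (Int × Int) × Int × Int × Int) :
    List (List Int) × List (Int × Int) × Int × Int × Int :=
  pvNbrs.foldl (fun st d => bfsTry n m st (x + d.1, y + d.2)) st

theorem bfsTry_measure (n m : Int) (st : List (List Int) × List (Int × Int) × Int × Int × Int)
    (p : Int × Int) :
    pvOnes (bfsTry n m st p).1 + (bfsTry n m st p).2.1.length ≤ pvOnes st.1 + st.2.1.length := by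
  unfold bfsTry
  split_ifs with hc
  · have := pvOnes_setCell_lt st.1 p.1 p.2 hc.2.2.2.2
    simp only [List.length_append, List.length_cons, List.length_nil]
    omega
  · exact le_refl _

theorem bfsPop_measure (n m x y : Int)
    (st : List (List Int) × List (Int × Int) × Int × Int × Int) :
    pvOnes (bfsPop n m x y st).1 + (bfsPop n m x y st).2.1.length
      ≤ pvOnes st.1 + st.2.1.length := by
  unfold bfsPop
  exact foldl_mono_measure (fun s => pvOnes s.1 + s.2.1.length) _
    (fun s a => bfsTry_measure n m s _) pvNbrs st

-- A's `while queue:` loop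
def bfsLoop (n m : Int) (L : List (List Int)) (q : List (Int × Int)) (size mn mx : Int) :
    List (List Int) × Int × Int × Int :=
  match q with
  | [] => (L, size, mn, mx)
  | (x, y) :: q' =>
    let st := bfsPop n m x y (L, q', size, mn, mx)
    bfsLoop n m st.1 st.2.1 st.2.2.1 st.2.2.2.1 st.2.2.2.2
termination_by pvOnes L + q.length
decreasing_by
  have h := bfsPop_measure n m x y (L, q', size, mn, mx)
  simp only [List.length_cons] at h ⊢
  omega

def solution (land : List (List Int)) : Int :=
  let n : Int := land.length
  let m : Int := (land.headD []).length
  let st := (PySem.List.pyRange 0 n 1).foldl (fun st i =>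
      (PySem.List.pyRange 0 m 1).foldl (fun st j =>
        if pvGetCell st.1 i j = 1 then
          let r := bfsLoop n m (pvSetCell st.1 i j (-1)) [(i, j)] 1 j j
          (r.1, (PySem.List.pyRange r.2.2.1 (r.2.2.2 + 1) 1).foldl
            (fun t k => t.set k.toNat (t.getD k.toNat 0 + r.2.1)) st.2)
        else st) st)
    (land, List.replicate m.toNat 0)
  (PySem.List.max? st.2 (fun v => v)).getD 0   -- max(total); Pre_ gives total ≠ []

-- ===== PORT B =====
-- same guarded mark-and-collect step, but collecting into the next-level list `nxt`
def lvlTry (n m : Int) (st : List (List Int) × List (Int × Int) × Int × Int × Int)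
    (p : Int × Int) : List (List Int) × List (Int × Int) × Int × Int × Int :=
  if 0 ≤ p.1 ∧ p.1 < n ∧ 0 ≤ p.2 ∧ p.2 < m ∧ pvGetCell st.1 p.1 p.2 = 1 then
    (pvSetCell st.1 p.1 p.2 (-1), st.2.1 ++ [p], st.2.2.1 + 1,
      min st.2.2.2.1 p.2, max st.2.2.2.2 p.2)
  else st

-- `for nx, ny in ((x-1,y),(x+1,y),(x,y-1),(x,y+1)):` for one frontier cell
def lvlCell (n m : Int) (st : List (List Int) × List (Int × Int) × Int × Int × Int)
    (c : Int × Int) : List (List Int) × List (Int × Int) × Int × Int × Int :=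
  [(c.1 - 1, c.2), (c.1 + 1, c.2), (c.1, c.2 - 1), (c.1, c.2 + 1)].foldl (lvlTry n m) st

theorem lvlFold_measure (n m : Int) (f : List (Int × Int))
    (st : List (List Int) × List (Int × Int) × Int × Int × Int) :
    pvOnes (f.foldl (lvlCell n m) st).1 + (f.foldl (lvlCell n m) st).2.1.length
      ≤ pvOnes st.1 + st.2.1.length := by
  refine foldl_mono_measure (fun s => pvOnes s.1 + s.2.1.length) _ (fun s c => ?_) f st
  unfold lvlCell
  exact foldl_mono_measure (fun s => pvOnes s.1 + s.2.1.length) (lvlTry n m)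
    (fun s a => bfsTry_measure n m s a) _ s

-- B's `while frontier:` loop
def lvlLoop (n m : Int) (L : List (List Int)) (frontier : List (Int × Int))
    (size mn mx : Int) : List (List Int) × Int × Int × Int :=
  match frontier with
  | [] => (L, size, mn, mx)
  | c :: fs =>
    let st := (c :: fs).foldl (lvlCell n m) (L, ([] : List (Int × Int)), size, mn, mx)
    lvlLoop n m st.1 st.2.1 st.2.2.1 st.2.2.2.1 st.2.2.2.2
termination_by pvOnes L + frontier.length
decreasing_by
  have h := lvlFold_measure n m (c :: fs) (L, ([] : List (Int × Int)), size, mn, mx)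
  simp only [List.length_cons, List.length_nil] at h ⊢
  omega

def solution_alt (land : List (List Int)) : Int :=
  let n : Int := land.length
  let m : Int := (land.headD []).length
  let st := (PySem.List.pyRange 0 n 1).foldl (fun st i =>
      (PySem.List.pyRange 0 m 1).foldl (fun st j =>
        if pvGetCell st.1 i j = 1 then
          let r := lvlLoop n m (pvSetCell st.1 i j (-1)) [(i, j)] 1 j j
          let d1 := st.2.set r.2.2.1.toNat (st.2.getD r.2.2.1.toNat 0 + r.2.1)
          (r.1, d1.set (r.2.2.2 + 1).toNat (d1.getD (r.2.2.2 + 1).toNat 0 - r.2.1))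
        else st) st)
    (land, List.replicate (m.toNat + 1) 0)
  let fin := (PySem.List.pyRange 0 m 1).foldl (fun (acc : Option Int × Int) k =>
      let run := acc.2 + st.2.getD k.toNat 0
      match acc.1 with
      | none => (some run, run)
      | some b => (some (if run > b then run else b), run)) (none, 0)
  fin.1.getD 0   -- Python B returns `best`, which is an int whenever m ≥ 1 (Pre_)

-- ===== PRECONDITION & SPEC =====
-- Pre_ is exactly where Python A returns: a nonempty grid with a nonempty first row
-- (else len(land[0]) or max([]) raises) in which every row has at least len(land[0])
-- entries (else land[i][j] raises in the scan).
def Pre_solution (land : List (List Int)) : Prop :=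
  land ≠ [] ∧ 1 ≤ (land.headD []).length ∧ ∀ row ∈ land, (land.headD []).length ≤ row.length
instance (land : List (List Int)) : Decidable (Pre_solution land) := by
  unfold Pre_solution; infer_instance

def pvWitness_solution : List (List Int) := [[1, 0], [0, 1]]

def Spec_solution (land : List (List Int)) (out : Int) : Prop := out = solution_alt land
instance (land : List (List Int)) (out : Int) : Decidable (Spec_solution land out) := by
  unfold Spec_solution; infer_instance

-- ===== CLAIM (what is proved, stated in full; the proofs are below) =====
def Claim_equal_solution : Prop := ∀ (land : List (List Int)), Dom_solution land → Pre_solution land → Spec_solution land (solution land)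


-- ===== LEMMAS AND PROOFS =====

-- the four neighbour candidates of a cell, as B writes them
def pvCand (c : Int × Int) : List (Int × Int) :=
  [(c.1 - 1, c.2), (c.1 + 1, c.2), (c.1, c.2 - 1), (c.1, c.2 + 1)]

theorem bfsTry_mk (n m : Int) (L : List (List Int)) (t : List (Int × Int)) (s mn mx : Int)
    (p : Int × Int) :
    bfsTry n m (L, t, s, mn, mx) p =
      if 0 ≤ p.1 ∧ p.1 < n ∧ 0 ≤ p.2 ∧ p.2 < m ∧ pvGetCell L p.1 p.2 = 1 then
        (pvSetCell L p.1 p.2 (-1), t ++ [p], s + 1, min mn p.2, max mx p.2)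
      else (L, t, s, mn, mx) := rfl

-- appended-to queue/frontier suffix does not depend on what is already queued
theorem tryFold_shift (n m : Int) (cs : List (Int × Int)) :
    ∀ (L : List (List Int)) (t : List (Int × Int)) (s mn mx : Int),
      cs.foldl (bfsTry n m) (L, t, s, mn, mx) =
        (let C := cs.foldl (bfsTry n m) (L, [], s, mn, mx); (C.1, t ++ C.2.1, C.2.2)) := by
  induction cs with
  | nil => intro L t s mn mx; simp
  | cons p cs ih =>
    intro L t s mn mx
    simp only [List.foldl_cons, bfsTry_mk]
    split_ifs with hc
    · rw [ih (pvSetCell L p.1 p.2 (-1)) (t ++ [p]), ih (pvSetCell L p.1 p.2 (-1)) ([] ++ [p])]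
      simp
    · exact ih L t s mn mx

theorem lvlCell_eq_candFold (n m : Int) (st : List (List Int) × List (Int × Int) × Int × Int × Int)
    (c : Int × Int) : lvlCell n m st c = (pvCand c).foldl (bfsTry n m) st := rfl

theorem bfsPop_eq_candFold (n m x y : Int)
    (st : List (List Int) × List (Int × Int) × Int × Int × Int) :
    bfsPop n m x y st = (pvCand (x, y)).foldl (bfsTry n m) st := by
  unfold bfsPop pvNbrs pvCand
  simp only [List.foldl_cons, List.foldl_nil, add_zero, sub_eq_add_neg]

-- the FIFO queue processes exactly level after level
theorem bfs_run_frontier (n m : Int) :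
    ∀ (f : List (Int × Int)) (L : List (List Int)) (r : List (Int × Int)) (s mn mx : Int),
      bfsLoop n m L (f ++ r) s mn mx =
        (let st := f.foldl (lvlCell n m) (L, r, s, mn, mx);
         bfsLoop n m st.1 st.2.1 st.2.2.1 st.2.2.2.1 st.2.2.2.2) := by
  intro f
  induction f with
  | nil => intro L r s mn mx; simp
  | cons c f' ih =>
    intro L r s mn mx
    obtain ⟨x, y⟩ := c
    rw [List.cons_append, bfsLoop]
    simp only
    rw [bfsPop_eq_candFold, tryFold_shift]
    simp only
    rw [show (f' ++ r) ++ ((pvCand (x,y)).foldl (bfsTry n m) (L, [], s, mn, mx)).2.1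
          = f' ++ (r ++ ((pvCand (x,y)).foldl (bfsTry n m) (L, [], s, mn, mx)).2.1)
        from by rw [List.append_assoc]]
    rw [ih]
    simp only [List.foldl_cons, lvlCell_eq_candFold, tryFold_shift n m (pvCand (x,y)) L r]

-- invariants preserved by folds
theorem foldl_pres {α σ : Type} (P : σ → Prop) (f : σ → α → σ)
    (h : ∀ s a, P s → P (f s a)) : ∀ (l : List α) (s : σ), P s → P (l.foldl f s) := by
  intro l
  induction l with
  | nil => intro s hs; exact hs
  | cons c cs ih => intro s hs; exact ih (f s c) (h s c hs)

def pvMB (m : Int) (st : List (List Int) × List (Int × Int) × Int × Int × Int) : Prop :=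
  0 ≤ st.2.2.2.1 ∧ st.2.2.2.1 ≤ st.2.2.2.2 ∧ st.2.2.2.2 < m

theorem bfsTry_pres (n m : Int) (st : List (List Int) × List (Int × Int) × Int × Int × Int)
    (p : Int × Int) (h : pvMB m st) : pvMB m (bfsTry n m st p) := by
  unfold bfsTry
  split_ifs with hc
  · obtain ⟨h0, h1, h2⟩ := h
    refine ⟨le_min h0 hc.2.2.1, le_trans (min_le_left _ _) (le_trans h1 (le_max_left _ _)),
      max_lt h2 hc.2.2.2.1⟩
  · exact h

theorem lvlFold_pres (n m : Int) (f : List (Int × Int))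
    (st : List (List Int) × List (Int × Int) × Int × Int × Int) (h : pvMB m st) :
    pvMB m (f.foldl (lvlCell n m) st) := by
  refine foldl_pres (pvMB m) _ (fun s c hs => ?_) f st h
  exact foldl_pres (pvMB m) _ (fun s' p hs' => bfsTry_pres n m s' p hs') (pvCand c) s hs

theorem lvlLoop_bounds (n m : Int) (L : List (List Int)) (f : List (Int × Int))
    (s mn mx : Int) :
    0 ≤ mn → mn ≤ mx → mx < m →
    0 ≤ (lvlLoop n m L f s mn mx).2.2.1 ∧
      (lvlLoop n m L f s mn mx).2.2.1 ≤ (lvlLoop n m L f s mn mx).2.2.2 ∧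
      (lvlLoop n m L f s mn mx).2.2.2 < m := by
  induction L, f, s, mn, mx using lvlLoop.induct n m with
  | case1 L s mn mx =>
    intro h0 h1 h2
    rw [lvlLoop]
    exact ⟨h0, h1, h2⟩
  | case2 L s mn mx c fs st ih =>
    intro h0 h1 h2
    rw [lvlLoop.eq_def]
    have hp := lvlFold_pres n m (c :: fs) (L, ([] : List (Int × Int)), s, mn, mx) ⟨h0, h1, h2⟩
    exact ih hp.1 hp.2.1 hp.2.2

-- prefix sums of the difference array
def pvPfx (d : List Int) (k : Nat) : Int := ((List.range k).map (fun l => d.getD l 0)).sum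

theorem pvPfx_succ (d : List Int) (k : Nat) : pvPfx d (k+1) = pvPfx d k + d.getD k 0 := by
  simp [pvPfx, List.range_succ]

theorem getD_set_int (d : List Int) (i : Nat) (v : Int) (j : Nat) :
    (d.set i v).getD j 0 = if i = j ∧ j < d.length then v else d.getD j 0 := by
  rw [List.getD_eq_getElem?_getD, List.getElem?_set]
  by_cases hij : i = j
  · subst hij
    by_cases hlen : i < d.length
    · simp [hlen]
    · rw [if_pos rfl, if_neg hlen, if_neg (by omega : ¬(i = i ∧ i < d.length)),
        List.getD_eq_getElem?_getD, List.getElem?_eq_none (by omega)]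
  · simp only [if_neg hij, if_neg (by omega : ¬(i = j ∧ j < d.length))]
    rw [List.getD_eq_getElem?_getD]

theorem pvPfx_set (d : List Int) (i : Nat) (v : Int) (k : Nat) :
    pvPfx (d.set i v) k = pvPfx d k + (if i < k ∧ i < d.length then v - d.getD i 0 else 0) := by
  induction k with
  | zero => simp [pvPfx]
  | succ k ih =>
    rw [pvPfx_succ, pvPfx_succ, ih, getD_set_int]
    by_cases hik : i = k
    · subst hik
      split_ifs <;> omega
    · split_ifs <;> omega

-- effect of A's `for k in range(min_j, max_j + 1): total[k] += size`
theorem rangeAdd_spec (sz : Int) : ∀ (c : Nat), ∀ (a b : Int) (t : List Int), 0 ≤ a →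
    (b + 1 - a).toNat = c → b < (t.length : Int) →
    ((PySem.List.pyRange a (b+1) 1).foldl (fun t k => t.set k.toNat (t.getD k.toNat 0 + sz)) t).length = t.length ∧
    ∀ j : Nat, ((PySem.List.pyRange a (b+1) 1).foldl (fun t k => t.set k.toNat (t.getD k.toNat 0 + sz)) t).getD j 0
      = t.getD j 0 + (if a ≤ (j:Int) ∧ (j:Int) ≤ b then sz else 0) := by
  intro c
  induction c with
  | zero =>
    intro a b t ha hc hb
    rw [PySem.List.pyRange_one_eq_nil (by omega)]
    refine ⟨rfl, fun j => ?_⟩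
    rw [if_neg (by omega)]
    simp
  | succ c ih =>
    intro a b t ha hc hb
    rw [PySem.List.pyRange_one_cons (by omega)]
    simp only [List.foldl_cons]
    obtain ⟨ihl, ihp⟩ := ih (a+1) b (t.set a.toNat (t.getD a.toNat 0 + sz)) (by omega) (by omega)
      (by rw [List.length_set]; omega)
    refine ⟨by rw [ihl, List.length_set], fun j => ?_⟩
    rw [ihp j, getD_set_int]
    by_cases haj : a.toNat = j
    · subst haj
      rw [if_pos ⟨rfl, by omega⟩]
      split_ifs <;> omega
    · rw [if_neg (fun h => haj h.1)]
      split_ifs <;> omega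

theorem getD_map_range_int (f : Nat → Int) (n k : Nat) (hk : k < n) :
    ((List.range n).map f).getD k 0 = f k := by
  rw [List.getD_eq_getElem?_getD, List.getElem?_map, List.getElem?_range hk]
  rfl

-- one component: A's range-add on `total` matches B's two point-updates on `diff`
theorem step_inv (mm : Nat) (total diff : List Int)
    (hd : diff.length = mm + 1)
    (ht : total = (List.range mm).map (fun k => pvPfx diff (k+1)))
    (mn mx sz : Int) (h0 : 0 ≤ mn) (h1 : mn ≤ mx) (h2 : mx < (mm : Int)) :
    (PySem.List.pyRange mn (mx+1) 1).foldl (fun t k => t.set k.toNat (t.getD k.toNat 0 + sz)) total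
      = (List.range mm).map (fun k =>
          pvPfx ((diff.set mn.toNat (diff.getD mn.toNat 0 + sz)).set (mx+1).toNat
            ((diff.set mn.toNat (diff.getD mn.toNat 0 + sz)).getD (mx+1).toNat 0 - sz)) (k+1)) ∧
    ((diff.set mn.toNat (diff.getD mn.toNat 0 + sz)).set (mx+1).toNat
      ((diff.set mn.toNat (diff.getD mn.toNat 0 + sz)).getD (mx+1).toNat 0 - sz)).length = mm + 1 := by
  have hlt : total.length = mm := by rw [ht]; simp
  obtain ⟨hl, hp⟩ := rangeAdd_spec sz (mx + 1 - mn).toNat mn mx total h0 rfl (by omega)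
  constructor
  · apply List.ext_getElem
    · rw [hl, hlt]; simp
    · intro k hk1 hk2
      have hkm : k < mm := by simpa using hk2
      rw [← List.getD_eq_getElem _ 0, ← List.getD_eq_getElem _ 0]
      rw [hp k, getD_map_range_int _ _ _ hkm]
      rw [show total.getD k 0 = pvPfx diff (k+1) from by rw [ht, getD_map_range_int _ _ _ hkm]]
      rw [pvPfx_set, pvPfx_set, getD_set_int]
      have hmn : mn.toNat < diff.length := by omega
      have hmx : (mx+1).toNat < (diff.set mn.toNat (diff.getD mn.toNat 0 + sz)).length := by
        rw [List.length_set]; omega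
      split_ifs <;> omega
  · rw [List.length_set, List.length_set, hd]

theorem max_append_singleton (xs : List Int) (v y : Int)
    (h : PySem.List.max? xs (fun v => v) = some v) :
    PySem.List.max? (xs ++ [y]) (fun v => v) = some (max v y) := by
  cases xs with
  | nil =>
    rw [(PySem.List.max?_eq_none_iff _ _).mpr rfl] at h
    exact absurd h (by simp)
  | cons x t =>
    rw [PySem.List.max?_id_cons] at h
    rw [List.cons_append, PySem.List.max?_id_cons, List.foldl_append]
    simp only [List.foldl_cons, List.foldl_nil]
    rw [← Option.some.inj h]

-- B's prefix-sum/running-max scan computes max(total) for total[k] = pvPfx diff (k+1)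
theorem scanB (diff : List Int) : ∀ (mm : Nat), 1 ≤ mm →
    ((PySem.List.pyRange 0 (mm:Int) 1).foldl (fun (acc : Option Int × Int) k =>
        let run := acc.2 + diff.getD k.toNat 0
        match acc.1 with
        | none => (some run, run)
        | some b => (some (if run > b then run else b), run)) (none, 0))
      = (PySem.List.max? ((List.range mm).map (fun k => pvPfx diff (k+1))) (fun v => v),
         pvPfx diff mm) := by
  intro mm
  induction mm with
  | zero => omega
  | succ t ih =>
    intro _
    by_cases ht : 1 ≤ t
    · have hcast : ((t + 1 : Nat) : Int) = (t : Int) + 1 := by push_cast; ring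
      rw [hcast, PySem.List.pyRange_one_succ_right (by positivity), List.foldl_append,
        ih ht]
      simp only [List.foldl_cons, List.foldl_nil]
      have hne : (List.range t).map (fun k => pvPfx diff (k+1)) ≠ [] := by
        simp; omega
      obtain ⟨v, hv⟩ : ∃ v, PySem.List.max? ((List.range t).map (fun k => pvPfx diff (k+1)))
          (fun v => v) = some v := by
        cases hx : PySem.List.max? ((List.range t).map (fun k => pvPfx diff (k+1)))
            (fun v => v) with
        | none => exact absurd ((PySem.List.max?_eq_none_iff _ _).mp hx) hne
        | some v => exact ⟨v, rfl⟩
      rw [hv]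
      have hrun : pvPfx diff t + diff.getD ((t:Int)).toNat 0 = pvPfx diff (t+1) := by
        rw [pvPfx_succ]; simp
      rw [List.range_succ, List.map_append, List.map_cons, List.map_nil,
        max_append_singleton _ v _ hv]
      simp only [hrun]
      rw [Prod.mk.injEq]
      refine ⟨?_, rfl⟩
      congr 1
      split_ifs with hgt
      · rw [max_eq_right (by omega)]
      · rw [max_eq_left (by omega)]
    · have ht0 : t = 0 := by omega
      subst ht0
      rw [show ((1 : Nat) : Int) = 1 from rfl,
        PySem.List.pyRange_one_cons (by omega), PySem.List.pyRange_one_eq_nil (by omega)]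
      simp only [List.foldl_cons, List.foldl_nil]
      rw [Prod.mk.injEq]
      constructor
      · rw [show List.range (0+1) = [0] from rfl]
        simp only [List.map_cons, List.map_nil, PySem.List.max?_id_cons, List.foldl_nil]
        simp [pvPfx]
      · simp [pvPfx]

theorem scanB1 (diff : List Int) (mm : Nat) (h : 1 ≤ mm) :
    ((PySem.List.pyRange 0 (mm:Int) 1).foldl (fun (acc : Option Int × Int) k =>
        let run := acc.2 + diff.getD k.toNat 0
        match acc.1 with
        | none => (some run, run)
        | some b => (some (if run > b then run else b), run)) (none, 0)).1
      = PySem.List.max? ((List.range mm).map (fun k => pvPfx diff (k+1))) (fun v => v) := by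
  rw [scanB diff mm h]

theorem bfs_eq_lvl (n m : Int) (L : List (List Int)) (f : List (Int × Int)) (s mn mx : Int) :
    bfsLoop n m L f s mn mx = lvlLoop n m L f s mn mx := by
  induction L, f, s, mn, mx using lvlLoop.induct n m with
  | case1 L s mn mx => simp [bfsLoop, lvlLoop]
  | case2 L s mn mx c fs st ih =>
    have h0 : (c :: fs) = (c :: fs) ++ ([] : List (Int × Int)) := by simp
    conv_lhs => rw [h0]
    rw [bfs_run_frontier n m (c :: fs) L [] s mn mx]
    conv_rhs => rw [lvlLoop.eq_def]
    exact ih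


-- named copies of the two ports' fold bodies (definitionally equal to the lambdas in the ports)
def bodyA (n m i : Int) (st : List (List Int) × List Int) (j : Int) : List (List Int) × List Int :=
  if pvGetCell st.1 i j = 1 then
    let r := bfsLoop n m (pvSetCell st.1 i j (-1)) [(i, j)] 1 j j
    (r.1, (PySem.List.pyRange r.2.2.1 (r.2.2.2 + 1) 1).foldl
      (fun t k => t.set k.toNat (t.getD k.toNat 0 + r.2.1)) st.2)
  else st

def bodyB (n m i : Int) (st : List (List Int) × List Int) (j : Int) : List (List Int) × List Int :=
  if pvGetCell st.1 i j = 1 then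
    let r := lvlLoop n m (pvSetCell st.1 i j (-1)) [(i, j)] 1 j j
    let d1 := st.2.set r.2.2.1.toNat (st.2.getD r.2.2.1.toNat 0 + r.2.1)
    (r.1, d1.set (r.2.2.2 + 1).toNat (d1.getD (r.2.2.2 + 1).toNat 0 - r.2.1))
  else st

def pvInv (mm : Nat) (pA pB : List (List Int) × List Int) : Prop :=
  pA.1 = pB.1 ∧ pB.2.length = mm + 1 ∧
    pA.2 = (List.range mm).map (fun k => pvPfx pB.2 (k+1))

theorem body_step (n m : Int) (mm : Nat) (hm : m = (mm : Int)) (i j : Int)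
    (hj : 0 ≤ j ∧ j < m) (pA pB : List (List Int) × List Int) (h : pvInv mm pA pB) :
    pvInv mm (bodyA n m i pA j) (bodyB n m i pB j) := by
  obtain ⟨h1, h2, h3⟩ := h
  unfold bodyA bodyB
  rw [h1]
  by_cases hc : pvGetCell pB.1 i j = 1
  · rw [if_pos hc, if_pos hc]
    simp only [bfs_eq_lvl]
    have hb := lvlLoop_bounds n m (pvSetCell pB.1 i j (-1)) [(i, j)] 1 j j hj.1 le_rfl hj.2
    obtain ⟨hstep1, hstep2⟩ := step_inv mm pA.2 pB.2 h2 h3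
      (lvlLoop n m (pvSetCell pB.1 i j (-1)) [(i, j)] 1 j j).2.2.1
      (lvlLoop n m (pvSetCell pB.1 i j (-1)) [(i, j)] 1 j j).2.2.2
      (lvlLoop n m (pvSetCell pB.1 i j (-1)) [(i, j)] 1 j j).2.1
      hb.1 hb.2.1 (by rw [← hm]; exact hb.2.2)
    exact ⟨rfl, hstep2, hstep1⟩
  · rw [if_neg hc, if_neg hc]
    exact ⟨h1, h2, h3⟩

theorem inner_eq (n m : Int) (mm : Nat) (hm : m = (mm : Int)) (i : Int) :
    ∀ (js : List Int), (∀ j ∈ js, 0 ≤ j ∧ j < m) →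
    ∀ (pA pB : List (List Int) × List Int), pvInv mm pA pB →
      pvInv mm (js.foldl (bodyA n m i) pA) (js.foldl (bodyB n m i) pB) := by
  intro js
  induction js with
  | nil => intro _ pA pB h; exact h
  | cons j js ih =>
    intro hjs pA pB h
    simp only [List.foldl_cons]
    exact ih (fun x hx => hjs x (by simp [hx]))
      _ _ (body_step n m mm hm i j (hjs j (by simp)) pA pB h)

theorem outer_eq (n m : Int) (mm : Nat) (hm : m = (mm : Int)) :
    ∀ (is : List Int) (pA pB : List (List Int) × List Int), pvInv mm pA pB →
      pvInv mm (is.foldl (fun st i => (PySem.List.pyRange 0 m 1).foldl (bodyA n m i) st) pA)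
        (is.foldl (fun st i => (PySem.List.pyRange 0 m 1).foldl (bodyB n m i) st) pB) := by
  intro is
  induction is with
  | nil => intro pA pB h; exact h
  | cons i is ih =>
    intro pA pB h
    simp only [List.foldl_cons]
    exact ih _ _ (inner_eq n m mm hm i (PySem.List.pyRange 0 m 1)
      (fun j hj => (PySem.List.mem_pyRange_one).mp hj) pA pB h)

theorem pvPfx_replicate_zero (n k : Nat) : pvPfx (List.replicate n (0:Int)) k = 0 := by
  have hg : ∀ l : Nat, (List.replicate n (0:Int)).getD l 0 = 0 := by
    intro l
    rw [List.getD_eq_getElem?_getD, List.getElem?_replicate]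
    split_ifs <;> rfl
  unfold pvPfx
  simp only [hg]
  simp

theorem init_inv (land : List (List Int)) (mm : Nat) :
    pvInv mm (land, List.replicate mm 0) (land, List.replicate (mm + 1) 0) := by
  refine ⟨rfl, by simp, ?_⟩
  simp only [pvPfx_replicate_zero]
  simp


-- ===== VERDICT (by name: the statement is the Claim_ definition above) =====
theorem solution_spec : Claim_equal_solution := by
  intro land _ hpre
  obtain ⟨hne, hm1, hrows⟩ := hpre
  unfold Spec_solution
  have hA : solution land =
      (PySem.List.max? (((PySem.List.pyRange 0 (land.length : Int) 1).foldl
        (fun st i => (PySem.List.pyRange 0 ((land.headD []).length : Int) 1).foldl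
          (bodyA (land.length : Int) ((land.headD []).length : Int) i) st)
        (land, List.replicate ((land.headD []).length : Int).toNat 0)).2)
        (fun v => v)).getD 0 := rfl
  rw [hA]
  rw [show ((land.headD []).length : Int).toNat = (land.headD []).length from Int.toNat_natCast _]
  obtain ⟨hL, hlen, htot⟩ := outer_eq (land.length : Int) ((land.headD []).length : Int)
    (land.headD []).length rfl (PySem.List.pyRange 0 (land.length : Int) 1)
    (land, List.replicate (land.headD []).length 0)
    (land, List.replicate ((land.headD []).length + 1) 0)
    (init_inv land (land.headD []).length)
  rw [htot]
  rw [← scanB1 _ (land.headD []).length hm1]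
  rfl
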